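-- pv_equiv track=rewrite | github.com/a-longe/CSC110 | 2023-10-24/19_two_lists.py | better_create_pairs
-- ===== SOURCE A (Python) =====
-- def better_create_pairs(list1:list[int], list2:list[int], filler:int) -> list[tuple[int]]:
--     """
--     Takes two lists and returns pairs of integers which share indecies
--     if one list is shorter than the other, use the filler argument
--     to use as a default value to replace the missing integers
--     >>> better_create_pairs([2, 3, 4], [5, 6], 1000)
--     [(2, 5), (3, 6), (4, 1000)]
--     """
--     pairs = []
--
--     # find larger list
--     if len(list1) >= len(list2):
--         list_size = len(list1)
--     else:
--         list_size = len(list2)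
--
--     for index in range(list_size):
--         element1:int
--         element2:int
--
--         try:
--             element1 = list1[index]
--         except IndexError:
--             element1 = filler
--
--         try:
--             element2 = list2[index]
--         except IndexError:
--             element2 = filler
--
--         pairs.append((element1, element2))
--     return pairs
-- ===== SOURCE B (Python) =====
-- def better_create_pairs(list1, list2, filler):
--     pairs = [(a, b) for a, b in zip(list1, list2)]
--     if len(list1) > len(list2):
--         pairs += [(x, filler) for x in list1[len(list2):]]
--     else:
--         pairs += [(filler, y) for y in list2[len(list1):]]
--     return pairs
-- ===== Notes on version B (the rewrite author's own statement) =====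
-- stated objective: idiomatic
-- what changed: Replaces the per-index try/except loop over range(max(len)) with a zip over the common prefix followed by one pass over only the leftover tail of the longer list, padded with the filler on the correct side.
import Mathlib
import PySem

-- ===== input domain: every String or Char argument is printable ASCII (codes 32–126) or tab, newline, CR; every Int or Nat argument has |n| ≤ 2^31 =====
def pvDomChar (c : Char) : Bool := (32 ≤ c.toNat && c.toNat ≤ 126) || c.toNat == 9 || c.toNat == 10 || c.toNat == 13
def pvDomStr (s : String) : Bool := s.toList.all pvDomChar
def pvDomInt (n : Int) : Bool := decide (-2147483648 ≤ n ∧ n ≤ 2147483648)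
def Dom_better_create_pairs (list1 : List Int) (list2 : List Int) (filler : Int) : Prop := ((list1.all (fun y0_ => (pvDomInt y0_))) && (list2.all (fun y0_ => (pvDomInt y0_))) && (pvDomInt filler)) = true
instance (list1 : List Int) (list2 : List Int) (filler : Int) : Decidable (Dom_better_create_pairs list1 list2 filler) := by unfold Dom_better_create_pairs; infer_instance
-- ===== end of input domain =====

-- B replaces A's per-index try/except loop with a zip over the common prefix plus one tail pass (idiomatic; same cost).


-- ===== PORT A =====
def better_create_pairs (list1 : List Int) (list2 : List Int) (filler : Int) : List (Int × Int) :=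
  -- find larger list
  let list_size := if list1.length ≥ list2.length then list1.length else list2.length
  -- for index in range(list_size): try list[index] except IndexError: filler; append
  (List.range list_size).foldl
    (fun pairs (index : Nat) =>
      pairs ++ [(((PySem.List.pyGet? list1 (index : Int)).getD filler),
                 ((PySem.List.pyGet? list2 (index : Int)).getD filler))]) []

-- ===== PORT B =====
def better_create_pairs_alt (list1 : List Int) (list2 : List Int) (filler : Int) : List (Int × Int) :=
  let pairs := (list1.zip list2).map (fun ab => (ab.1, ab.2))
  if list2.length < list1.length then
    pairs ++ (list1.drop list2.length).map (fun x => (x, filler))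
  else
    pairs ++ (list2.drop list1.length).map (fun y => (filler, y))

-- ===== PRECONDITION & SPEC =====
def Spec_better_create_pairs (list1 : List Int) (list2 : List Int) (filler : Int) (out : List (Int × Int)) : Prop := out = better_create_pairs_alt list1 list2 filler
instance (list1 : List Int) (list2 : List Int) (filler : Int) (out : List (Int × Int)) : Decidable (Spec_better_create_pairs list1 list2 filler out) := by unfold Spec_better_create_pairs; infer_instance

-- ===== CLAIM (what is proved, stated in full; the proofs are below) =====
def Claim_equal_better_create_pairs : Prop := ∀ (list1 : List Int) (list2 : List Int) (filler : Int), Dom_better_create_pairs list1 list2 filler → Spec_better_create_pairs list1 list2 filler (better_create_pairs list1 list2 filler)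

-- ===== LEMMAS AND PROOFS =====

lemma pyGet?_nil_int (j : Int) : PySem.List.pyGet? ([] : List Int) j = none := by
  simp [PySem.List.pyGet?, PySem.List.pyIdx?]

lemma alt_cons (a b : Int) (l1 l2 : List Int) (f : Int) :
    better_create_pairs_alt (a :: l1) (b :: l2) f = (a, b) :: better_create_pairs_alt l1 l2 f := by
  simp [better_create_pairs_alt]
  split_ifs <;> simp

lemma range_map_left (l : List Int) (f : Int) :
    (List.range l.length).map
      (fun (i : Nat) => (((PySem.List.pyGet? l (i : Int)).getD f),
                 ((PySem.List.pyGet? ([] : List Int) (i : Int)).getD f)))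
    = l.map (fun x => (x, f)) := by
  induction l with
  | nil => simp
  | cons a t ih =>
    rw [List.length_cons, List.range_succ_eq_map, List.map_cons, List.map_map]
    simp only [Nat.cast_zero, PySem.List.pyGet?_zero_cons, Option.getD_some]
    congr 1
    rw [← ih]
    apply List.map_congr_left
    intro i _
    have : ((i + 1 : Nat) : Int) = (i : Int) + 1 := by push_cast; ring
    simp [Function.comp, this, PySem.List.pyGet?_cons_succ, pyGet?_nil_int]

lemma range_map_right (l : List Int) (f : Int) :
    (List.range l.length).map
      (fun (i : Nat) => (((PySem.List.pyGet? ([] : List Int) (i : Int)).getD f),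
                 ((PySem.List.pyGet? l (i : Int)).getD f)))
    = l.map (fun y => (f, y)) := by
  induction l with
  | nil => simp
  | cons a t ih =>
    rw [List.length_cons, List.range_succ_eq_map, List.map_cons, List.map_map]
    simp only [Nat.cast_zero, PySem.List.pyGet?_zero_cons, Option.getD_some]
    congr 1
    rw [← ih]
    apply List.map_congr_left
    intro i _
    have : ((i + 1 : Nat) : Int) = (i : Int) + 1 := by push_cast; ring
    simp [Function.comp, this, PySem.List.pyGet?_cons_succ, pyGet?_nil_int]

lemma range_map_main (l1 l2 : List Int) (f : Int) :
    (List.range (if l1.length ≥ l2.length then l1.length else l2.length)).map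
      (fun (i : Nat) => (((PySem.List.pyGet? l1 (i : Int)).getD f),
                 ((PySem.List.pyGet? l2 (i : Int)).getD f)))
    = better_create_pairs_alt l1 l2 f := by
  induction l1 generalizing l2 with
  | nil =>
    cases l2 with
    | nil => simp [better_create_pairs_alt]
    | cons b t =>
      have hc : ¬ (List.length ([] : List Int) ≥ (b :: t).length) := by simp
      rw [if_neg hc, range_map_right]
      simp [better_create_pairs_alt]
  | cons a t1 ih =>
    cases l2 with
    | nil =>
      have hc : (a :: t1).length ≥ List.length ([] : List Int) := by simp
      rw [if_pos hc, range_map_left]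
      simp [better_create_pairs_alt]
    | cons b t2 =>
      have hsz : (if (a :: t1).length ≥ (b :: t2).length then (a :: t1).length else (b :: t2).length)
          = (if t1.length ≥ t2.length then t1.length else t2.length) + 1 := by
        simp only [List.length_cons]; split_ifs <;> omega
      rw [hsz, List.range_succ_eq_map, List.map_cons, List.map_map]
      simp only [Nat.cast_zero, PySem.List.pyGet?_zero_cons, Option.getD_some]
      rw [alt_cons, ← ih]
      congr 1
      apply List.map_congr_left
      intro i _
      have : ((i + 1 : Nat) : Int) = (i : Int) + 1 := by push_cast; ring
      simp [Function.comp, this, PySem.List.pyGet?_cons_succ]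

-- ===== VERDICT (by name: the statement is the Claim_ definition above) =====
theorem better_create_pairs_spec : Claim_equal_better_create_pairs := by
  intro l1 l2 f _
  unfold Spec_better_create_pairs better_create_pairs
  rw [PySem.List.foldl_append_singleton_eq_map]
  exact range_map_main l1 l2 f
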